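-- pv_equiv track=rewrite | github.com/tS1lva/Engenharia-de-Software-PUCC | Criptografia e Decodificação com NumPy.py | textoParaNumero
-- ===== SOURCE A (Python) =====
-- dic = {1:'A', 2:'B', 3:'C', 4:'D', 5:'E', 6:'F', 7:'G', 8:'H', 9:'I', 10:'J',
--        11:'K', 12:'L', 13:'M', 14:'N', 15:'O', 16:'P', 17:'Q', 18:'R', 19:'S', 20:'T',
--        21:'U', 22:'V', 23:'W', 24:'X', 25:'Y', 0:'Z'}
--
-- def textoParaNumero(texto):
--     num = []
--     if(len(texto)%2 != 0):
--         ultimaLetra = len(texto)-1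
--         texto = texto + texto[ultimaLetra]
--     for ii in texto:
--         for j in dic:
--             if dic[j] == ii:
--                 num.append(j)
--     return num
-- ===== SOURCE B (Python) =====
-- def textoParaNumero(texto):
--     if len(texto) % 2 != 0:
--         texto = texto + texto[-1]
--     # Arithmetic coding: no table at all. A's dict maps 'A'..'Y' to 1..25 and
--     # 'Z' to 0, which is exactly (ord(c) - 64) % 26 for uppercase letters;
--     # characters outside 'A'..'Z' are skipped, as in A.
--     return [(ord(c) - 64) % 26 for c in texto if 'A' <= c <= 'Z']
-- ===== Notes on version B (the rewrite author's own statement) =====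
-- stated objective: faster
-- what changed: B replaces the lookup table entirely by an arithmetic closed form: a character's code is (ord(c)-64)%26 for uppercase letters, skipping others, so A's per-character 26-entry dict scan disappears.
import Mathlib
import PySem

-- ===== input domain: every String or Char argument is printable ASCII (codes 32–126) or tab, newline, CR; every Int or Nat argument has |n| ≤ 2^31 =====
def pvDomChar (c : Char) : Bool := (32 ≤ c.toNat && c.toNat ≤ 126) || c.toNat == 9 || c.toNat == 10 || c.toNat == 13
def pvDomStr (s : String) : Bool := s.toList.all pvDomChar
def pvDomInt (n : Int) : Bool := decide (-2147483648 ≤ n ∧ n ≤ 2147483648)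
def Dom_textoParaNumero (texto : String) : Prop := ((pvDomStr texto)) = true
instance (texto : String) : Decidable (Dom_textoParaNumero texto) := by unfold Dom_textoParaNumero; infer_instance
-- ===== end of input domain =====

-- B replaces A's per-character scan of the 26-entry table by the arithmetic formula (ord(c)-64)%26 (faster by a constant factor)

-- ===== PORT A =====
-- the module-level dict 'dic' as an association list in insertion order
def dicA : List (Int × Char) :=
  [(1,'A'),(2,'B'),(3,'C'),(4,'D'),(5,'E'),(6,'F'),(7,'G'),(8,'H'),(9,'I'),(10,'J'),
   (11,'K'),(12,'L'),(13,'M'),(14,'N'),(15,'O'),(16,'P'),(17,'Q'),(18,'R'),(19,'S'),(20,'T'),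
   (21,'U'),(22,'V'),(23,'W'),(24,'X'),(25,'Y'),(0,'Z')]

def textoParaNumero (texto : String) : List Int :=
  let cs := texto.toList
  let cs :=
    if cs.length % 2 ≠ 0 then
      -- texto = texto + texto[len(texto)-1]; the index is in range whenever this branch runs
      match PySem.List.pyGet? cs ((cs.length : Int) - 1) with
      | some c => cs ++ [c]
      | none => cs
    else cs
  cs.foldl (fun num ii =>
    dicA.foldl (fun num p => if p.2 == ii then num ++ [p.1] else num) num) []

-- ===== PORT B =====
def textoParaNumero_alt (texto : String) : List Int :=
  let cs := texto.toList
  let cs :=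
    if cs.length % 2 ≠ 0 then
      cs ++ (match PySem.List.pyGet? cs (-1) with
             | some c => [c]
             | none => [])
    else cs
  -- 'A' <= c <= 'Z' is Python's code-point comparison: 65 ≤ ord(c) ≤ 90 (exact);
  -- (ord(c) - 64) % 26 via Python's mod
  cs.filterMap (fun c =>
    if 65 ≤ c.toNat ∧ c.toNat ≤ 90 then
      some (PySem.Int.mod ((c.toNat : Int) - 64) 26)
    else none)

-- ===== PRECONDITION & SPEC =====
def Spec_textoParaNumero (texto : String) (out : List Int) : Prop := out = textoParaNumero_alt texto
instance (texto : String) (out : List Int) : Decidable (Spec_textoParaNumero texto out) := by unfold Spec_textoParaNumero; infer_instance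

-- ===== CLAIM (what is proved, stated in full; the proofs are below) =====
def Claim_equal_textoParaNumero : Prop := ∀ (texto : String), Dom_textoParaNumero texto → Spec_textoParaNumero texto (textoParaNumero texto)

-- ===== LEMMAS AND PROOFS =====

-- B's per-character step, as a named function
def stepB (c : Char) : Option Int :=
  if 65 ≤ c.toNat ∧ c.toNat ≤ 90 then
    some (PySem.Int.mod ((c.toNat : Int) - 64) 26)
  else none

-- the inner fold only appends, so the accumulator factors out
theorem fold_acc (l : List (Int × Char)) (ii : Char) (acc : List Int) :
    l.foldl (fun num p => if p.2 == ii then num ++ [p.1] else num) acc =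
      acc ++ l.foldl (fun num p => if p.2 == ii then num ++ [p.1] else num) [] := by
  induction l generalizing acc with
  | nil => simp
  | cons p l ih =>
      simp only [List.foldl]
      rw [ih, ih (if p.2 == ii then [] ++ [p.1] else [])]
      split <;> simp

-- no key of l matches ii ⇒ the scan finds nothing
theorem fold_nohit (l : List (Int × Char)) (ii : Char) (h : ii ∉ l.map Prod.snd) :
    l.foldl (fun num p => if p.2 == ii then num ++ [p.1] else num) [] = [] := by
  induction l with
  | nil => simp
  | cons p l ih =>
      simp only [List.map_cons, List.mem_cons, not_or] at h
      simp only [List.foldl]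
      have hb : (p.2 == ii) = false := by
        refine beq_eq_false_iff_ne.mpr ?_
        exact fun hc => h.1 hc.symm
      simp only [hb, Bool.false_eq_true, if_false]
      exact ih h.2

-- A's full table scan for one character equals B's arithmetic step
theorem char_step (c : Char) :
    dicA.foldl (fun num p => if p.2 == c then num ++ [p.1] else num) [] =
      (stepB c).toList := by
  by_cases h : 65 ≤ c.toNat ∧ c.toNat ≤ 90
  · obtain ⟨h1, h2⟩ := h
    have hc : c = Char.ofNat c.toNat := (Char.ofNat_toNat c).symm
    rw [hc]
    generalize hg : c.toNat = n at h1 h2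
    interval_cases n <;> decide
  · have hne : c ∉ dicA.map Prod.snd := by
      intro hmem
      apply h
      simp only [dicA, List.map_cons, List.map_nil, List.mem_cons, List.not_mem_nil, or_false] at hmem
      rcases hmem with rfl|rfl|rfl|rfl|rfl|rfl|rfl|rfl|rfl|rfl|rfl|rfl|rfl|rfl|rfl|rfl|rfl|rfl|rfl|rfl|rfl|rfl|rfl|rfl|rfl|rfl <;>
        exact ⟨by decide, by decide⟩
    rw [fold_nohit dicA c hne]
    have hs : stepB c = none := by simp [stepB, h]
    simp [hs]

-- the whole outer fold equals B's filterMap pass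
theorem outer_eq (cs : List Char) :
    cs.foldl (fun num ii =>
        dicA.foldl (fun num p => if p.2 == ii then num ++ [p.1] else num) num) [] =
      cs.filterMap stepB := by
  have main : ∀ acc, cs.foldl (fun num ii =>
      dicA.foldl (fun num p => if p.2 == ii then num ++ [p.1] else num) num) acc =
        acc ++ cs.filterMap stepB := by
    induction cs with
    | nil => simp
    | cons c cs ih =>
        intro acc
        rw [List.foldl_cons, fold_acc, char_step, ih, List.filterMap_cons]
        cases stepB c <;> simp
  simpa using main []

-- the two padding steps produce the same list
theorem pad_eq (cs : List Char) :
    (if cs.length % 2 ≠ 0 then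
        match PySem.List.pyGet? cs ((cs.length : Int) - 1) with
        | some c => cs ++ [c]
        | none => cs
      else cs) =
    (if cs.length % 2 ≠ 0 then
        cs ++ (match PySem.List.pyGet? cs (-1) with
               | some c => [c]
               | none => [])
      else cs) := by
  split
  · rename_i h
    have hne : cs ≠ [] := by
      intro hc; subst hc; simp at h
    have h1 : PySem.List.pyGet? cs ((cs.length : Int) - 1) = cs.getLast? := by
      have he : ((cs.length : Int) - 1) = ((cs.length - 1 : Nat) : Int) := by
        have : 0 < cs.length := List.length_pos_iff.mpr hne
        omega
      rw [he, PySem.List.pyGet?_natCast]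
      simp [List.getLast?_eq_getElem?]
    rw [h1, PySem.List.pyGet?_neg_one]
    cases hg : cs.getLast? with
    | none => exact absurd (List.getLast?_eq_none_iff.mp hg) hne
    | some c => simp
  · rfl

-- ===== VERDICT (by name: the statement is the Claim_ definition above) =====
theorem textoParaNumero_spec : Claim_equal_textoParaNumero := by
  intro texto _
  unfold Spec_textoParaNumero textoParaNumero textoParaNumero_alt
  simp only [pad_eq]
  rw [outer_eq]
  rfl
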